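-- pv_equiv track=rewrite | github.com/AppleYoujatea/OriginalApplePie | 2nd_quarter/week04/pepe/과일장수.py | solution
-- ===== SOURCE A (Python) =====
-- def solution(k, m, score):
--
--     answer = 0
--
--     result = []
--     sorted_score = sorted(score, reverse=True)
--
--     for i in range(0, len(sorted_score) + 1, m):
--         result.append(sorted_score[i:i+m])
--
--     for res in result:
--         if len(res) == m:
--             answer += res[-1] * m
--
--     return answer
-- ===== SOURCE B (Python) =====
-- def solution(k, m, score):
--     sorted_score = sorted(score, reverse=True)
--     answer = 0
--     for i in range(m - 1, len(sorted_score), m):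
--         answer += sorted_score[i] * m
--     return answer
-- ===== Notes on version B (the rewrite author's own statement) =====
-- stated objective: simpler
-- what changed: Instead of materializing a list of m-sized chunk sublists and then scanning them for full chunks, B walks the box-minimum indices directly with range(m-1, len, m) and accumulates sorted_score[i]*m in a single pass with no intermediate lists.
import Mathlib
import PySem

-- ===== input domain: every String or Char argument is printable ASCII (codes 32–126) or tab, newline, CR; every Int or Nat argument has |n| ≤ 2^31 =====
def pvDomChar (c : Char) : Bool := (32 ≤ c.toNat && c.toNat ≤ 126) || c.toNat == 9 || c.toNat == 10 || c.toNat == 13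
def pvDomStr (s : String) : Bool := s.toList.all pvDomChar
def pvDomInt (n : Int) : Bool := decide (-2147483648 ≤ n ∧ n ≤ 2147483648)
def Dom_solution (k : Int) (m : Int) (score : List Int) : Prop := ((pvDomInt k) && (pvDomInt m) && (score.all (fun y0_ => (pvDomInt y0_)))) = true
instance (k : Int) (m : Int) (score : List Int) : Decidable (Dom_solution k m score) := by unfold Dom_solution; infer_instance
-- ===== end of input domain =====

-- B replaces A's chunk-list construction by a single pass over the box-minimum
-- indices range(m-1, len, m); objective: simpler (no intermediate lists).

-- ===== PORT A =====
def solution (k : Int) (m : Int) (score : List Int) : Int :=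
  let sorted_score := PySem.List.sorted score (fun x => x) true
  let result : List (List Int) :=
    (PySem.List.pyRange 0 ((sorted_score.length : Int) + 1) m).foldl
      (fun result i => result ++ [PySem.List.slice sorted_score (some i) (some (i + m))]) []
  result.foldl
    (fun answer res =>
      if (res.length : Int) = m then answer + (PySem.List.pyGetD res (-1) 0) * m else answer)
    0

-- ===== PORT B =====
def solution_alt (k : Int) (m : Int) (score : List Int) : Int :=
  let sorted_score := PySem.List.sorted score (fun x => x) true
  (PySem.List.pyRange (m - 1) (sorted_score.length : Int) m).foldl
    (fun answer i => answer + (PySem.List.pyGetD sorted_score i 0) * m) 0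

-- ===== PRECONDITION & SPEC =====
-- Pre_ excludes only m = 0, where Python's range(..., 0) raises ValueError in both A and B.
def Pre_solution (k : Int) (m : Int) (score : List Int) : Prop := m ≠ 0
instance (k : Int) (m : Int) (score : List Int) : Decidable (Pre_solution k m score) := by unfold Pre_solution; infer_instance

def pvWitness_solution : Int × Int × List Int := (5, 2, [1, 2, 3])

def Spec_solution (k : Int) (m : Int) (score : List Int) (out : Int) : Prop := out = solution_alt k m score
instance (k : Int) (m : Int) (score : List Int) (out : Int) : Decidable (Spec_solution k m score out) := by unfold Spec_solution; infer_instance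

-- ===== CLAIM (what is proved, stated in full; the proofs are below) =====
def Claim_equal_solution : Prop := ∀ (k : Int) (m : Int) (score : List Int), Dom_solution k m score → Pre_solution k m score → Spec_solution k m score (solution k m score)

-- ===== LEMMAS AND PROOFS =====

-- appending one element per step builds the map of the list
theorem pv_foldl_build {α β : Type} (h : α → β) (l : List α) (acc : List β) :
    l.foldl (fun r i => r ++ [h i]) acc = acc ++ l.map h := by
  induction l generalizing acc with
  | nil => simp
  | cons x xs ih => simp [List.foldl, ih]

-- a pyRange with negative step and start below stop is empty
theorem pv_pyRange_neg_nil (a b s : Int) (hs : s < 0) (hab : a ≤ b) :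
    PySem.List.pyRange a b s = [] := by
  unfold PySem.List.pyRange
  have h1 : ¬ s = 0 := by omega
  have h2 : ¬ 0 < s := by omega
  have h3 : ¬ b < a := by omega
  simp [h1, h2, h3]

-- the core identity, stated over the sorted list s: summing min*m over the full
-- m-chunks of s equals summing s[i]*m over i = m-1, 2m-1, … below s.length
theorem pv_core (m : Int) (hm : 0 < m) (s : List Int) :
    ((PySem.List.pyRange 0 ((s.length : Int) + 1) m).foldl
        (fun r i => r ++ [PySem.List.slice s (some i) (some (i + m))]) []).foldl
      (fun answer res =>
        if (res.length : Int) = m then answer + (PySem.List.pyGetD res (-1) 0) * m else answer) 0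
    = (PySem.List.pyRange (m - 1) (s.length : Int) m).foldl
        (fun answer i => answer + (PySem.List.pyGetD s i 0) * m) 0 := by
  have hm' : m ≠ 0 := by omega
  set n : ℕ := s.length with hn
  set K : Int := (n : Int) / m with hKdef
  have hK0 : 0 ≤ K := Int.ediv_nonneg (by positivity) (le_of_lt hm)
  have hKm : m * K ≤ (n : Int) := by
    have := (Int.le_ediv_iff_mul_le hm (a := K) (b := (n : Int))).1 (le_refl K)
    linarith [this]
  have hKm' : (n : Int) < m * K + m := by
    by_contra h
    have : K + 1 ≤ K := (Int.le_ediv_iff_mul_le hm (a := K + 1) (b := (n : Int))).2 (by linarith)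
    omega
  -- counts
  have hcntA : (((n : Int) + 1 - 0 + m - 1) / m) = K + 1 := by
    have h1 : (n : Int) + 1 - 0 + m - 1 = (n : Int) + 1 * m := by ring
    rw [h1, Int.add_mul_ediv_right _ _ hm']
  have hposA : (0 : Int) < (n : Int) + 1 := by positivity
  rw [pv_foldl_build, List.nil_append, List.foldl_map,
      PySem.List.pyRange_of_pos 0 ((n : Int) + 1) hm,
      PySem.List.pyRange_of_pos (m - 1) (n : Int) hm,
      if_pos hposA, hcntA]
  have htn : (K + 1).toNat = K.toNat + 1 := by omega
  have hcntB : (if m - 1 < (n : Int) then (((n : Int) - (m - 1) + m - 1) / m).toNat else 0)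
      = K.toNat := by
    by_cases h : m - 1 < (n : Int)
    · have h1 : (n : Int) - (m - 1) + m - 1 = (n : Int) := by ring
      rw [if_pos h, h1]
    · have hK : K = 0 := Int.ediv_eq_zero_of_lt (by positivity) (by omega)
      rw [if_neg h, hK]
      rfl
  rw [htn, hcntB, List.foldl_map, List.foldl_map, List.range_succ, List.foldl_append]
  -- the last chunk of A is not full: its contribution is the accumulator itself
  have hlast : ∀ acc : Int,
      (if (((PySem.List.slice s (some (0 + m * (K.toNat : Int)))
              (some (0 + m * (K.toNat : Int) + m))).length : Int) = m)
        then acc + (PySem.List.pyGetD (PySem.List.slice s (some (0 + m * (K.toNat : Int)))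
              (some (0 + m * (K.toNat : Int) + m))) (-1) 0) * m
        else acc) = acc := by
    intro acc
    have hKcast : ((K.toNat : Int)) = K := by omega
    rw [if_neg]
    rw [hKcast, PySem.List.length_slice]
    simp only [PySem.List.clampIdx]
    have e0 : ¬ ((0 : Int) + m * K < 0) := by nlinarith
    have e1 : ¬ ((0 : Int) + m * K + m < 0) := by nlinarith
    rw [if_neg e1, if_neg e0]
    omega
  simp only [List.foldl_cons, List.foldl_nil]
  rw [hlast]
  -- both remaining folds run over List.range K.toNat; compare them pointwise
  apply PySem.List.foldl_congr_mem
  intro acc j hj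
  have hj' : (j : Int) < K := by
    have := List.mem_range.1 hj
    omega
  have hjn : m * (j : Int) + m ≤ (n : Int) := by
    have : ((j : Int) + 1) * m ≤ (n : Int) :=
      (Int.le_ediv_iff_mul_le hm (a := (j : Int) + 1) (b := (n : Int))).1 (by omega)
    linarith
  have hj0 : (0 : Int) ≤ m * (j : Int) := by positivity
  -- A's chunk j is full
  have hslice : PySem.List.slice s (some (0 + m * (j : Int))) (some (0 + m * (j : Int) + m))
      = (s.drop (m * (j : Int)).toNat).take ((m * (j : Int) + m).toNat - (m * (j : Int)).toNat) := by
    rw [PySem.List.slice_toNat s (by omega) (by omega)]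
    ring_nf
  have hlen : ((s.drop (m * (j : Int)).toNat).take
      ((m * (j : Int) + m).toNat - (m * (j : Int)).toNat)).length = m.toNat := by
    simp
    omega
  rw [hslice, if_pos (by rw [hlen]; omega)]
  -- the chunk's last element is s at index m*(j+1)-1
  have hne : (s.drop (m * (j : Int)).toNat).take
      ((m * (j : Int) + m).toNat - (m * (j : Int)).toNat) ≠ [] := by
    intro h
    rw [h] at hlen
    simp at hlen
    omega
  rw [PySem.List.pyGetD_neg_one _ _ hne,
      PySem.List.pyGetD_eq_getElem s 0 (by omega) (by omega)]
  simp only [List.getLast_eq_getElem, List.getElem_take, List.getElem_drop]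
  congr 1
  congr 1
  apply getElem_congr rfl
  rw [hlen]; omega

-- ===== VERDICT (by name: the statement is the Claim_ definition above) =====
theorem solution_spec : Claim_equal_solution := by
  intro k m score _ hm
  unfold Spec_solution solution solution_alt
  dsimp only
  rcases lt_or_gt_of_ne hm with hneg | hpos
  · rw [pv_pyRange_neg_nil 0 _ m hneg (by positivity),
        pv_pyRange_neg_nil (m - 1) _ m hneg (by omega)]
    rfl
  · exact pv_core m hpos (PySem.List.sorted score (fun x => x) true)
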